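-- pv_equiv track=rewrite | github.com/peterbikes/100_Python_Projects | 100 Python Projects/Jacobsthal Numbers/jacobsthal_numbers.py | find_prev_jacob
-- ===== SOURCE A (Python) =====
-- def find_prev_jacob(number):
--     if number == 0:
--         return 0
--     if number == 1:
--         return 0
--     prev = 1
--     i = 3
--     swap = 3
--     while 1:
--         if(i >= number):
--             return prev
--         swap = i
--         i = i + (2*prev)
--         prev = swap
-- ===== SOURCE B (Python) =====
-- def find_prev_jacob(number):
--     if number == 0:
--         return 0
--     if number == 1:
--         return 0
--     if number <= 3:
--         return 1
--     k = (3 * number).bit_length()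
--     best = 1
--     for j in (k - 2, k - 1):
--         c = (2 ** j - (-1) ** j) // 3
--         if c < number:
--             best = c
--     return best
-- ===== Notes on version B (the rewrite author's own statement) =====
-- stated objective: alternative
-- what changed: Replaces A's iterate-the-Jacobsthal-recurrence-until-i>=number loop by the closed form J(j)=(2**j-(-1)**j)//3 evaluated at two candidate indices read off the bit length of 3*number, keeping the 0/1 and <=3 guards.
import Mathlib
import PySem

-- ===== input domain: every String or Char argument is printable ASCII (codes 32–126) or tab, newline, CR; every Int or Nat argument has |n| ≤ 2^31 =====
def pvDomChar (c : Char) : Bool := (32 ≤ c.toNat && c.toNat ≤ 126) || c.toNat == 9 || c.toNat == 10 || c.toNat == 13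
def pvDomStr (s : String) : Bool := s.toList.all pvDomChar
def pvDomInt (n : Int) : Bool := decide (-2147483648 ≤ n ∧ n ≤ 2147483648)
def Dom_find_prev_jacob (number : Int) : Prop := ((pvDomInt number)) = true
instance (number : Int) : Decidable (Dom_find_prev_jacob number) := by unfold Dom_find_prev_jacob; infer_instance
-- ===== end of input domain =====

-- B replaces A's Jacobsthal-recurrence loop by the closed form J(j) = (2^j - (-1)^j)//3 at an
-- index read off the bit length of 3*number (objective: alternative algorithm, iteration-free core).

-- ===== PORT A =====
-- A's while-loop: returns prev as soon as i >= number, else (prev, i) := (i, i + 2*prev).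
-- The two proof arguments (0 < prev, prev < i) only justify termination; they carry no data.
def loopA (number prev i : Int) (hp : 0 < prev) (hpi : prev < i) : Int :=
  if number ≤ i then prev
  else loopA number i (i + 2 * prev) (lt_trans hp hpi) (by omega)
termination_by (number - i).toNat
decreasing_by omega

def find_prev_jacob (number : Int) : Int :=
  if number = 0 then 0
  else if number = 1 then 0
  else loopA number 1 3 (by norm_num) (by norm_num)

-- ===== PORT B =====
-- jacClosed j = (2**j - (-1)**j) // 3, Python's floor division via PySem.
def jacClosed (j : Nat) : Int := PySem.Int.floordiv ((2 : Int) ^ j - (-1 : Int) ^ j) 3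

def find_prev_jacob_alt (number : Int) : Int :=
  if number = 0 then 0
  else if number = 1 then 0
  else if number ≤ 3 then 1
  else
    let k := PySem.Int.bitLength (3 * number)
    [k - 2, k - 1].foldl (fun best j => if jacClosed j < number then jacClosed j else best) 1

-- ===== PRECONDITION & SPEC =====
def Spec_find_prev_jacob (number : Int) (out : Int) : Prop := out = find_prev_jacob_alt number
instance (number : Int) (out : Int) : Decidable (Spec_find_prev_jacob number out) := by unfold Spec_find_prev_jacob; infer_instance

-- ===== CLAIM (what is proved, stated in full; the proofs are below) =====
def Claim_equal_find_prev_jacob : Prop := ∀ (number : Int), Dom_find_prev_jacob number → Spec_find_prev_jacob number (find_prev_jacob number)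

-- ===== LEMMAS AND PROOFS =====

theorem jac_dvd (j : Nat) : (3 : Int) ∣ ((2 : Int) ^ j - (-1 : Int) ^ j) := by
  induction j with
  | zero => simp
  | succ n ih =>
    have : (2 : Int) ^ (n + 1) - (-1 : Int) ^ (n + 1) =
        2 * ((2 : Int) ^ n - (-1 : Int) ^ n) + 3 * (-1 : Int) ^ n := by ring
    rw [this]
    exact dvd_add (Dvd.dvd.mul_left ih 2) (Dvd.intro _ rfl)

theorem three_jac (j : Nat) : 3 * jacClosed j = (2 : Int) ^ j - (-1 : Int) ^ j := by
  unfold jacClosed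
  rw [PySem.Int.floordiv_eq_ediv_of_pos (by norm_num : (0:Int) < 3)]
  exact Int.mul_ediv_cancel' (jac_dvd j)

theorem jac_rec (m : Nat) : jacClosed (m + 1) + 2 * jacClosed m = jacClosed (m + 2) := by
  have h1 := three_jac m
  have h2 := three_jac (m + 1)
  have h3 := three_jac (m + 2)
  have e2 : (2 : Int) ^ (m + 1) = 2 * 2 ^ m := by ring
  have e2' : (2 : Int) ^ (m + 2) = 4 * 2 ^ m := by ring
  have e1 : (-1 : Int) ^ (m + 1) = -(-1 : Int) ^ m := by ring
  have e1' : (-1 : Int) ^ (m + 2) = (-1 : Int) ^ m := by ring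
  rw [e2, e1] at h2
  rw [e2', e1'] at h3
  linarith

theorem jac_succ_lt (m : Nat) (hm : 2 ≤ m) : jacClosed m < jacClosed (m + 1) := by
  have h1 := three_jac m
  have h2 := three_jac (m + 1)
  have e2 : (2 : Int) ^ (m + 1) = 2 * 2 ^ m := by ring
  have e1 : (-1 : Int) ^ (m + 1) = -(-1 : Int) ^ m := by ring
  rw [e2, e1] at h2
  have hs : (-1 : Int) ^ m = 1 ∨ (-1 : Int) ^ m = -1 := neg_one_pow_eq_or _ _
  have hp : (4 : Int) ≤ 2 ^ m := by
    calc (4 : Int) = 2 ^ 2 := by norm_num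
    _ ≤ 2 ^ m := pow_le_pow_right₀ (by norm_num) hm
  rcases hs with hs | hs <;> rw [hs] at h1 h2 <;> linarith

theorem jac_lt (a b : Nat) (ha : 2 ≤ a) (hab : a < b) : jacClosed a < jacClosed b := by
  induction b with
  | zero => omega
  | succ n ih =>
    rcases Nat.lt_succ_iff_lt_or_eq.mp hab with h | h
    · exact lt_trans (ih h) (jac_succ_lt n (by omega))
    · subst h; exact jac_succ_lt a ha

theorem jac_le (a b : Nat) (ha : 2 ≤ a) (hab : a ≤ b) : jacClosed a ≤ jacClosed b := by
  rcases Nat.lt_or_ge a b with h | h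
  · exact le_of_lt (jac_lt a b ha h)
  · have : a = b := by omega
    subst this; exact le_refl _

theorem jac_two : jacClosed 2 = 1 := by decide
theorem jac_three : jacClosed 3 = 3 := by decide

-- sign bounds of (-1)^m
theorem neg_one_pow_bounds (m : Nat) : -1 ≤ (-1 : Int) ^ m ∧ (-1 : Int) ^ m ≤ 1 := by
  rcases neg_one_pow_eq_or ℤ m with h | h <;> rw [h] <;> norm_num

-- B characterization: when jacClosed m < number ≤ jacClosed (m+1) with 3 ≤ m, B returns jacClosed m.
theorem alt_eq (number : Int) (m : Nat) (hm : 3 ≤ m)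
    (hlo : jacClosed m < number) (hhi : number ≤ jacClosed (m + 1)) :
    find_prev_jacob_alt number = jacClosed m := by
  have h3 : (3 : Int) ≤ jacClosed m := by
    calc (3 : Int) = jacClosed 3 := jac_three.symm
    _ ≤ jacClosed m := jac_le 3 m (by omega) hm
  have hn4 : 4 ≤ number := by omega
  -- bit-length bookkeeping
  have hNpos : (0 : Int) < 3 * number := by omega
  set k := PySem.Int.bitLength (3 * number) with hk
  have hub : (3 * number).natAbs < 2 ^ k := PySem.Int.lt_two_pow_bitLength _
  have hlb : 2 ^ (k - 1) ≤ (3 * number).natAbs := PySem.Int.two_pow_bitLength_le _ (by omega)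
  have habs : ((3 * number).natAbs : Int) = 3 * number := Int.natAbs_of_nonneg (by omega)
  -- 2^m ≤ 3*number < 2^(m+2)
  have hsm := neg_one_pow_bounds m
  have hsm1 := neg_one_pow_bounds (m + 1)
  have h1 := three_jac m
  have h2 := three_jac (m + 1)
  have hlow : (2 : Int) ^ m ≤ 3 * number := by
    have : (2 : Int) ^ m = 3 * jacClosed m + (-1 : Int) ^ m := by linarith
    have hle : jacClosed m ≤ number - 1 := by omega
    nlinarith [hsm.2]
  have hhigh : 3 * number < (2 : Int) ^ (m + 2) := by
    have e2 : (2 : Int) ^ (m + 2) = 2 * 2 ^ (m + 1) := by ring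
    have hpow : (1 : Int) ≤ 2 ^ (m + 1) := one_le_pow₀ (by norm_num)
    nlinarith [hsm1.1]
  -- transfer to Nat
  have hlowN : 2 ^ m ≤ (3 * number).natAbs := by
    have := hlow
    rw [← habs] at this
    exact_mod_cast this
  have hhighN : (3 * number).natAbs < 2 ^ (m + 2) := by
    have := hhigh
    rw [← habs] at this
    exact_mod_cast this
  have hkm : m + 1 ≤ k := by
    by_contra hc
    push Not at hc
    have : (2 : Nat) ^ k ≤ 2 ^ m := Nat.pow_le_pow_right (by norm_num) (by omega)
    omega
  have hkm2 : k ≤ m + 2 := by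
    by_contra hc
    push Not at hc
    have : (2 : Nat) ^ (m + 2) ≤ 2 ^ (k - 1) := Nat.pow_le_pow_right (by norm_num) (by omega)
    omega
  -- evaluate B
  have g0 : ¬ number = 0 := by omega
  have g1 : ¬ number = 1 := by omega
  have g3 : ¬ number ≤ 3 := by omega
  unfold find_prev_jacob_alt
  rw [if_neg g0, if_neg g1, if_neg g3]
  simp only [List.foldl, ← hk]
  have hcase : k = m + 1 ∨ k = m + 2 := by omega
  rcases hcase with hkeq | hkeq <;> rw [hkeq]
  · -- k = m + 1 : candidates m-1, m
    have e1 : m + 1 - 2 = m - 1 := by omega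
    have e2 : m + 1 - 1 = m := by omega
    rw [e1, e2, if_pos hlo]
  · -- k = m + 2 : candidates m, m+1
    have e1 : m + 2 - 2 = m := by omega
    have e2 : m + 2 - 1 = m + 1 := by omega
    have hnot : ¬ jacClosed (m + 1) < number := by omega
    rw [e1, e2, if_pos hlo, if_neg hnot]

-- Loop invariant: state (prev, i) = (jacClosed m, jacClosed (m+1)); the loop computes B's value.
theorem loop_eq (number : Int) (hn : 3 < number) :
    ∀ (K m : Nat) (prev i : Int) (hp : 0 < prev) (hpi : prev < i),
      (number - i).toNat ≤ K → 2 ≤ m → prev = jacClosed m → i = jacClosed (m + 1) →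
      jacClosed m < number →
      loopA number prev i hp hpi = find_prev_jacob_alt number := by
  intro K
  induction K with
  | zero =>
    intro m prev i hp hpi hK hm hprev hi hlo
    rw [loopA]
    have hterm : number ≤ i := by omega
    rw [if_pos hterm]
    have hm3 : 3 ≤ m := by
      by_contra hc
      have hm2 : m = 2 := by omega
      have : i = 3 := by rw [hi, hm2]; exact jac_three
      omega
    rw [hprev]
    exact (alt_eq number m hm3 hlo (by omega)).symm
  | succ K ih =>
    intro m prev i hp hpi hK hm hprev hi hlo
    rw [loopA]
    by_cases hterm : number ≤ i
    · rw [if_pos hterm]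
      have hm3 : 3 ≤ m := by
        by_contra hc
        have hm2 : m = 2 := by omega
        have : i = 3 := by rw [hi, hm2]; exact jac_three
        omega
      rw [hprev]
      exact (alt_eq number m hm3 hlo (by omega)).symm
    · rw [if_neg hterm]
      refine ih (m + 1) i (i + 2 * prev) _ _ (by omega) (by omega) hi ?_ (by omega)
      rw [hi, hprev]
      exact jac_rec m

-- ===== VERDICT (by name: the statement is the Claim_ definition above) =====
theorem find_prev_jacob_spec : Claim_equal_find_prev_jacob := by
  unfold Claim_equal_find_prev_jacob
  intro number _
  unfold Spec_find_prev_jacob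
  by_cases h0 : number = 0
  · subst h0; rfl
  by_cases h1 : number = 1
  · subst h1; rfl
  by_cases h3 : number ≤ 3
  · have hA : find_prev_jacob number = 1 := by
      unfold find_prev_jacob
      rw [if_neg h0, if_neg h1, loopA, if_pos h3]
    have hB : find_prev_jacob_alt number = 1 := by
      unfold find_prev_jacob_alt
      rw [if_neg h0, if_neg h1, if_pos h3]
    rw [hA, hB]
  · have hA : find_prev_jacob number = loopA number 1 3 (by norm_num) (by norm_num) := by
      unfold find_prev_jacob
      rw [if_neg h0, if_neg h1]
    rw [hA]
    exact loop_eq number (by omega) (number - 3).toNat 2 1 3 (by norm_num) (by norm_num)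
      (by omega) (le_refl _) jac_two.symm (by rw [jac_three])
      (by rw [jac_two]; omega)
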